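-- pv_equiv track=rewrite | github.com/joshanashakya/dissertation | workspace/dataset/java-python/GeeksForGeeks/4032/A/2.py | max_length_substring
-- ===== SOURCE A (Python) =====
-- def max_length_substring(st, n, k):
--
--     # stores the maximum length
--     # of the required substring
--     max_len = 0
--
--     len = 0
--     for i in range(0, n):
--
--         # if the current character is 0
--         if (st[i] == '0'):
--             len = len + 1;
--         else:
--             len = 0
--
--         # stores maximum length of
--         # current substrings with zeroes
--         max_len = max(max_len, len)
--
--
--     # if the whole is filled
--     # with zero
--     if (max_len == n):
--         return n * k
--
--     pref = 0
--     suff = 0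
--
--     # computes the length of the maximal
--     # prefix which contains only zeroes
--     i = 0
--     while(st[i] == '0'):
--         i = i + 1
--         pref = pref + 1
--
--     # computes the length of the maximal
--     # suffix which contains only zeroes
--     i = n - 1
--     while(st[i] == '0'):
--         i = i - 1
--         suff = suff + 1
--
--     # if more than 1 concatenations
--     # are to be made
--     if (k > 1):
--         max_len = max(max_len,
--                       pref + suff)
--
--     return max_len
-- ===== SOURCE B (Python) =====
-- def max_length_substring(st, n, k):
--     # tokenize: normalize every non-'0' character to '1', then split into zero-runs
--     bits = ''.join('0' if c == '0' else '1' for c in st[:n])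
--     runs = bits.split('1')
--     max_len = max(len(r) for r in runs)
--     if max_len == n:
--         return n * k
--     if k > 1:
--         max_len = max(max_len, len(runs[0]) + len(runs[-1]))
--     return max_len
-- ===== Notes on version B (the rewrite author's own statement) =====
-- stated objective: idiomatic
-- what changed: B tokenizes: it normalizes st[:n] to a 0/1 string, splits it on '1' into the zero-runs and takes the max run length, reading prefix/suffix zero counts off the first/last run, replacing A's per-character accumulator loop and its two unbounded while-loops.
-- outside the precondition, e.g. on max_length_substring('010', -1, 0): A returns 0, B returns 1; on max_length_substring('0010', -2, 2): A raises IndexError, B returns 4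
import Mathlib
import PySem

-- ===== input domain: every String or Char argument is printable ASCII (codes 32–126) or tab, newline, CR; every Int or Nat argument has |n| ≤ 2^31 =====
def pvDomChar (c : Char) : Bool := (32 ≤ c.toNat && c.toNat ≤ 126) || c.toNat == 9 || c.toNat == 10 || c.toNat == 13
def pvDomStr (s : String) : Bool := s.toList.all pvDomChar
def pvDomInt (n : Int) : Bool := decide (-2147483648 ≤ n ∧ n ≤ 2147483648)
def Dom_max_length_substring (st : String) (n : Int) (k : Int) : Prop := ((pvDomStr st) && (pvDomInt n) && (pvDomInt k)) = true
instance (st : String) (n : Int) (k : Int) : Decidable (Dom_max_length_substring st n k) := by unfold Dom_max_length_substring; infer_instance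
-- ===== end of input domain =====

-- B replaces A's per-character accumulator loop and its two while-loops by tokenizing st[:n] into
-- its zero-runs (normalize to a 0/1 string, split on '1'); objective: idiomatic, equal return values on Pre_.

-- ===== PORT A =====
-- A-side helpers: the two 'while st[i] == '0'' loops, fuel-bounded (inside Pre_ each loop stops
-- at a non-'0' character before the fuel runs out; the 'none' branch is Python's IndexError)
def pvPrefLoop (cs : List Char) : Nat → Int → Int → Int
  | 0, _, pref => pref
  | fuel + 1, i, pref =>
    match PySem.List.pyGet? cs i with
    | none => pref
    | some ch => if ch = '0' then pvPrefLoop cs fuel (i + 1) (pref + 1) else pref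

def pvSuffLoop (cs : List Char) : Nat → Int → Int → Int
  | 0, _, suff => suff
  | fuel + 1, i, suff =>
    match PySem.List.pyGet? cs i with
    | none => suff
    | some ch => if ch = '0' then pvSuffLoop cs fuel (i - 1) (suff + 1) else suff

def max_length_substring (st : String) (n : Int) (k : Int) : Int :=
  let cs := st.toList
  let p := (PySem.List.pyRange 0 n 1).foldl
    (fun (p : Int × Int) i =>
      let len' := if PySem.List.pyGetD cs i '?' = '0' then p.2 + 1 else (0 : Int)
      (max p.1 len', len')) (0, 0)
  let max_len := p.1
  if max_len = n then n * k
  else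
    let pref := pvPrefLoop cs (2 * cs.length + 2) 0 0
    let suff := pvSuffLoop cs (2 * cs.length + 2) (n - 1) 0
    if k > 1 then max max_len (pref + suff) else max_len

-- ===== PORT B =====
-- B-side helper: Python's max() over a non-empty list (first element, then fold max);
-- the [] branch is unreachable (str.split never returns an empty list)
def pvPyMax : List Int → Int
  | [] => 0
  | x :: xs => xs.foldl max x

def max_length_substring_alt (st : String) (n : Int) (k : Int) : Int :=
  let s := PySem.List.slice st.toList none (some n)
  let bits := s.map (fun c => if c = '0' then '0' else '1')
  let runs := PySem.Chars.splitOn bits ['1']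
  let max_len := pvPyMax (runs.map (fun r => (r.length : Int)))
  if max_len = n then n * k
  else if k > 1 then
    max max_len (((PySem.List.pyGetD runs 0 []).length : Int) + ((PySem.List.pyGetD runs (-1) []).length : Int))
  else max_len

-- ===== PRECONDITION & SPEC =====
-- Pre_ excludes n > len(st) (A's for-loop raises IndexError there) and n < 0 (A's while-loops
-- then read st by Python's negative-index wraparound — an accident of A's implementation on
-- which A sometimes raises and otherwise returns a value B need not match).
def Pre_max_length_substring (st : String) (n : Int) (k : Int) : Prop :=
  0 ≤ n ∧ n ≤ (st.toList.length : Int)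
instance (st : String) (n : Int) (k : Int) : Decidable (Pre_max_length_substring st n k) := by
  unfold Pre_max_length_substring; infer_instance

def pvWitness_max_length_substring : String × Int × Int := ("0100", 4, 2)

def Spec_max_length_substring (st : String) (n : Int) (k : Int) (out : Int) : Prop := out = max_length_substring_alt st n k
instance (st : String) (n : Int) (k : Int) (out : Int) : Decidable (Spec_max_length_substring st n k out) := by unfold Spec_max_length_substring; infer_instance

-- ===== CLAIM (what is proved, stated in full; the proofs are below) =====
def Claim_equal_max_length_substring : Prop := ∀ (st : String) (n : Int) (k : Int), Dom_max_length_substring st n k → Pre_max_length_substring st n k → Spec_max_length_substring st n k (max_length_substring st n k)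

-- ===== LEMMAS AND PROOFS =====
-- pvR splits a string into its '0'-runs ('0'-kept segments between non-'0' separators);
-- pvR1 is the same for separator '1' (the shape of PySem.Chars.splitOn on the normalized string).
def pvR : List Char → List (List Char)
  | [] => [[]]
  | c :: l => if c = '0' then (pvR l).modifyHead (c :: ·) else [] :: pvR l

def pvR1 : List Char → List (List Char)
  | [] => [[]]
  | c :: l => if c = '1' then [] :: pvR1 l else (pvR1 l).modifyHead (c :: ·)

theorem pvMHid {α : Type} (R : List α) : R.modifyHead (fun x => x) = R := by
  cases R <;> simp

theorem pvMHcons {α : Type} (R : List (List α)) (a : List α) (c : α) :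
    List.modifyHead (fun x => (a ++ [c]) ++ x) R
      = List.modifyHead (fun x => a ++ x) (List.modifyHead (fun x => c :: x) R) := by
  cases R <;> simp

theorem pvGo (fuel : Nat) : ∀ (l cur acc : _), l.length < fuel →
    PySem.Chars.splitOn.go ['1'] fuel l cur acc = acc.reverse ++ (pvR1 l).modifyHead (cur.reverse ++ ·) := by
  induction fuel with
  | zero => intro l cur acc h; omega
  | succ f ih =>
    intro l cur acc h
    cases l with
    | nil => simp [PySem.Chars.splitOn.go, pvR1]
    | cons c rest =>
      rw [PySem.Chars.splitOn.go]
      by_cases hc : c = '1'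
      · subst hc
        simp only [List.isPrefixOf, BEq.rfl, Bool.true_and, if_pos]
        rw [ih _ _ _ (by simpa using Nat.lt_of_succ_lt_succ h)]
        simp only [pvR1, if_pos rfl, List.reverse_cons, List.reverse_append,
          List.modifyHead_cons, List.reverse_nil, List.nil_append, List.append_assoc,
          List.singleton_append, List.length_cons]
        simp [pvMHid]
      · have hpf : (['1'].isPrefixOf (c :: rest)) = false := by
          simp [List.isPrefixOf]; exact fun h' => (hc h'.symm).elim
        rw [hpf]
        simp only [Bool.false_eq_true, if_false]
        rw [ih _ _ _ (by simpa using Nat.lt_of_succ_lt_succ h)]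
        simp only [pvR1, hc, if_false, List.reverse_cons]
        rw [pvMHcons]

theorem pvSplitOn (bits : List Char) : PySem.Chars.splitOn bits ['1'] = pvR1 bits := by
  rw [PySem.Chars.splitOn]
  rw [pvGo _ _ _ _ (Nat.lt_succ_self _)]
  simp [pvMHid]

theorem pvR1_map (l : List Char) :
    pvR1 (l.map (fun c => if c = '0' then '0' else '1')) = pvR l := by
  induction l with
  | nil => rfl
  | cons c l ih =>
    by_cases hc : c = '0'
    · subst hc
      simp only [List.map_cons, if_pos rfl, pvR1, pvR]
      rw [if_neg (by decide), ih]
      simp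
    · simp only [List.map_cons, if_neg hc, pvR1, pvR, ih]
      simp [hc]

theorem pvR_ne_nil (l : List Char) : pvR l ≠ [] := by
  induction l with
  | nil => simp [pvR]
  | cons c l ih =>
    simp only [pvR]
    split
    · cases h : pvR l with
      | nil => exact absurd h ih
      | cons a t => simp
    · simp

def pvLens (l : List Char) : List Int := (pvR l).map (fun r => (r.length : Int))

theorem pvLens_ne_nil (l : List Char) : pvLens l ≠ [] := by
  simp [pvLens, pvR_ne_nil l]

theorem pvLens_nil : pvLens [] = [0] := rfl

theorem pvLens_cons_zero (l : List Char) : pvLens ('0' :: l) = (pvLens l).modifyHead (· + 1) := by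
  simp only [pvLens, pvR, if_pos rfl]
  cases h : pvR l with
  | nil => exact absurd h (pvR_ne_nil l)
  | cons a t => simp
               

theorem pvLens_cons_sep (c : Char) (hc : ¬ c = '0') (l : List Char) :
    pvLens (c :: l) = 0 :: pvLens l := by
  simp [pvLens, pvR, hc]

theorem pvLens_nonneg (l : List Char) : ∀ x ∈ pvLens l, 0 ≤ x := by
  simp only [pvLens]
  intro x hx
  obtain ⟨r, _, rfl⟩ := List.mem_map.mp hx
  positivity

theorem pvFoldlMax (xs : List Int) : ∀ a b : Int, xs.foldl max (max a b) = max a (xs.foldl max b) := by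
  induction xs with
  | nil => intro a b; rfl
  | cons x xs ih =>
    intro a b
    simp only [List.foldl_cons]
    rw [max_assoc, ih]

theorem pvPyMax_cons (c : Int) (L : List Int) (hL : L ≠ []) :
    pvPyMax (c :: L) = max c (pvPyMax L) := by
  cases L with
  | nil => exact absurd rfl hL
  | cons x xs => simp only [pvPyMax, List.foldl_cons]; rw [pvFoldlMax]

theorem pvHead_le_pyMax (x : Int) (xs : List Int) : x ≤ pvPyMax (x :: xs) := by
  cases xs with
  | nil => simp [pvPyMax]
  | cons y ys =>
    rw [pvPyMax_cons x (y :: ys) (by simp)]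
    exact le_max_left _ _

theorem pvPyMax_nonneg (L : List Int) (h : ∀ x ∈ L, 0 ≤ x) : 0 ≤ pvPyMax L := by
  cases L with
  | nil => simp [pvPyMax]
  | cons x xs => exact le_trans (h x List.mem_cons_self) (pvHead_le_pyMax x xs)

def pvStep : Int × Int → Char → Int × Int :=
  fun p c => let c' := if c = '0' then p.2 + 1 else 0; (max p.1 c', c')

theorem pvFold (l : List Char) : ∀ m c : Int, 0 ≤ c → c ≤ m →
    l.foldl pvStep (m, c) = (max m (pvPyMax ((pvLens l).modifyHead (c + ·))),
                             ((pvLens l).modifyHead (c + ·)).getLast?.getD 0) := by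
  induction l with
  | nil =>
    intro m c h0 hcm
    simp [pvLens_nil, pvPyMax, max_eq_left hcm]
  | cons x l ih =>
    intro m c h0 hcm
    by_cases hx : x = '0'
    · subst hx
      simp only [List.foldl_cons, pvStep, if_pos rfl, if_true, reduceIte]
      rw [ih (max m (c+1)) (c+1) (by omega) (le_max_right _ _)]
      rw [pvLens_cons_zero]
      have hcomp : ((pvLens l).modifyHead (· + 1)).modifyHead (fun t => c + t)
          = (pvLens l).modifyHead (fun t => (c + 1) + t) := by
        cases pvLens l with
        | nil => simp
        | cons a t => simp; ring
      rw [hcomp]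
      cases h : pvLens l with
      | nil => exact absurd h (pvLens_ne_nil l)
      | cons a t =>
        have ha : 0 ≤ a := pvLens_nonneg l a (by rw [h]; exact List.mem_cons_self)
        simp only [List.modifyHead_cons]
        have hle : c + 1 ≤ pvPyMax ((c + 1 + a) :: t) :=
          le_trans (by omega) (pvHead_le_pyMax (c + 1 + a) t)
        rw [max_assoc, max_eq_right hle]
    · simp only [List.foldl_cons, pvStep, if_neg hx]
      rw [ih (max m 0) 0 le_rfl (le_max_right _ _)]
      rw [max_eq_left (by omega : (0:Int) ≤ m)]
      rw [pvLens_cons_sep x hx]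
      have hid : (pvLens l).modifyHead (fun t => (0:Int) + t) = pvLens l := by
        cases pvLens l with
        | nil => simp
        | cons a t => simp
      rw [hid]
      have hmh : (0 :: pvLens l).modifyHead (fun t => c + t) = (c + 0) :: pvLens l := by simp
      rw [hmh]
      cases h : pvLens l with
      | nil => exact absurd h (pvLens_ne_nil l)
      | cons a t =>
        have hnn : 0 ≤ pvPyMax (a :: t) := by
          rw [← h]; exact pvPyMax_nonneg _ (pvLens_nonneg l)
        rw [pvPyMax_cons (c + 0) (a :: t) (by simp), List.getLast?_cons_cons]
        rw [← max_assoc, max_eq_left (by omega : c + 0 ≤ m)]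

theorem pvFold0 (l : List Char) :
    l.foldl pvStep (0, 0) = (pvPyMax (pvLens l), (pvLens l).getLast?.getD 0) := by
  rw [pvFold l 0 0 le_rfl le_rfl]
  have hid : (pvLens l).modifyHead (fun t => (0:Int) + t) = pvLens l := by
    cases pvLens l with
    | nil => simp
    | cons a t => simp
  rw [hid, max_eq_right (pvPyMax_nonneg _ (pvLens_nonneg l))]

theorem pvHeadD (l : List Char) : (pvR l).headD [] = l.takeWhile (· == '0') := by
  induction l with
  | nil => rfl
  | cons c l ih =>
    by_cases hc : c = '0'
    · subst hc
      simp only [pvR, if_pos rfl, List.takeWhile_cons]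
      cases h : pvR l with
      | nil => exact absurd h (pvR_ne_nil l)
      | cons a t => simp only [List.modifyHead_cons, List.headD_cons]
                    rw [h] at ih; simp at ih; simp [ih]
    · simp [pvR, hc, List.takeWhile_cons, hc]

theorem pvMH_append {α : Type} (xs ys : List α) (f : α → α) (h : xs ≠ []) :
    (xs ++ ys).modifyHead f = xs.modifyHead f ++ ys := by
  cases xs with
  | nil => exact absurd rfl h
  | cons a t => simp

theorem pvR_snoc_sep (l : List Char) (c : Char) (hc : ¬ c = '0') :
    pvR (l ++ [c]) = pvR l ++ [[]] := by
  induction l with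
  | nil => simp [pvR, hc]
  | cons a t ih =>
    by_cases ha : a = '0'
    · subst ha
      simp only [List.cons_append, pvR, if_pos rfl, reduceIte, ih]
      rw [pvMH_append _ _ _ (pvR_ne_nil t)]
    · simp [pvR, ha, ih]

theorem pvR_snoc_zero (l : List Char) :
    ∃ init last, pvR l = init ++ [last] ∧ pvR (l ++ ['0']) = init ++ [last ++ ['0']] := by
  induction l with
  | nil => exact ⟨[], [], rfl, rfl⟩
  | cons a t ih =>
    obtain ⟨init, last, h1, h2⟩ := ih
    by_cases ha : a = '0'
    · subst ha
      cases init with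
      | nil =>
        refine ⟨[], '0' :: last, ?_, ?_⟩
        · simp only [pvR, if_pos rfl, h1]; simp
        · simp only [List.cons_append, pvR, if_pos rfl, h2]; simp
      | cons i is =>
        refine ⟨('0' :: i) :: is, last, ?_, ?_⟩
        · simp only [pvR, if_pos rfl, h1]; simp
        · simp only [List.cons_append, pvR, if_pos rfl, h2]; simp
    · exact ⟨[] :: init, last, by simp [pvR, ha, h1], by simp [pvR, ha, h2]⟩

theorem pvLast (l : List Char) :
    ((pvR l).getLast?.getD []).length = (l.reverse.takeWhile (· == '0')).length := by
  induction l using List.reverseRecOn with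
  | nil => rfl
  | append_singleton l c ih =>
    by_cases hc : c = '0'
    · subst hc
      obtain ⟨init, last, h1, h2⟩ := pvR_snoc_zero l
      rw [h1, List.getLast?_concat] at ih
      rw [h2, List.getLast?_concat]
      simp only [Option.getD_some] at ih
      simp only [Option.getD_some, List.reverse_append, List.reverse_cons,
        List.reverse_nil, List.nil_append, List.singleton_append, List.takeWhile_cons]
      simp [ih]
    · rw [pvR_snoc_sep l c hc]
      simp [List.getLast?_concat, List.takeWhile_cons, hc]

theorem pvTW_get (xs : List Char) : ∀ j (hl : j < xs.length),
    j < (xs.takeWhile (· == '0')).length → xs[j] = '0' := by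
  induction xs with
  | nil => intro j hl; simp at hl
  | cons c t ih =>
    intro j hl hj
    cases j with
    | zero =>
      simp only [List.getElem_cons_zero]
      by_contra hc
      have hb : (c == '0') = false := by simpa using hc
      rw [List.takeWhile_cons, hb] at hj
      simp at hj
    | succ j' =>
      have hb : j' < (t.takeWhile (· == '0')).length := by
        by_cases hc : c = '0'
        · have hb : (c == '0') = true := by simpa using hc
          rw [List.takeWhile_cons, hb] at hj; simpa using hj
        · have hb : (c == '0') = false := by simpa using hc
          rw [List.takeWhile_cons, hb] at hj; simp at hj
      simpa using ih j' (by simpa using hl) hb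

theorem pvTW_bound (xs : List Char) : ∀ (j : Nat), j = (xs.takeWhile (· == '0')).length →
    ∀ (hW : j < xs.length), ¬ (xs[j] = '0') := by
  induction xs with
  | nil => intro j _ hW; simp at hW
  | cons c t ih =>
    intro j hj hW
    by_cases hc : c = '0'
    · have hb : (c == '0') = true := by simpa using hc
      rw [List.takeWhile_cons, hb] at hj
      simp only [if_pos rfl, List.length_cons, reduceIte] at hj
      cases j with
      | zero => omega
      | succ j' =>
        simp only [List.getElem_cons_succ]
        exact ih j' (by omega) (by simpa using hW)
    · have hb : (c == '0') = false := by simpa using hc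
      rw [List.takeWhile_cons, hb] at hj
      simp only [Bool.false_eq_true, if_false, List.length_nil] at hj
      subst hj
      simpa using hc

theorem pvTW_take (cs : List Char) : ∀ (m : Nat),
    ((cs.take m).takeWhile (· == '0')).length < m →
    cs.takeWhile (· == '0') = (cs.take m).takeWhile (· == '0') := by
  induction cs with
  | nil => intro m _; simp
  | cons c t ih =>
    intro m hm
    cases m with
    | zero => omega
    | succ m' =>
      simp only [List.take_succ_cons, List.takeWhile_cons] at hm ⊢
      by_cases hc : c = '0'
      · have hb : (c == '0') = true := by simpa using hc
        rw [hb] at hm ⊢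
        simp only [reduceIte, List.length_cons] at hm ⊢
        rw [ih m' (by omega)]
      · have hb : (c == '0') = false := by simpa using hc
        rw [hb] at hm ⊢
        simp

theorem pvPrefLoop_spec (cs : List Char) (hlt : (cs.takeWhile (· == '0')).length < cs.length) :
    ∀ (fuel : Nat) (j : Nat) (pref : Int), j ≤ (cs.takeWhile (· == '0')).length →
      (cs.takeWhile (· == '0')).length - j < fuel →
      pvPrefLoop cs fuel (j : Int) pref = pref + (((cs.takeWhile (· == '0')).length - j : Nat) : Int) := by
  set W := (cs.takeWhile (· == '0')).length with hWdef
  intro fuel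
  induction fuel with
  | zero => intro j pref hj hf; omega
  | succ f ih =>
    intro j pref hj hf
    have hjlen : j < cs.length := by omega
    rw [pvPrefLoop]
    rw [PySem.List.pyGet?_natCast, List.getElem?_eq_getElem hjlen]
    by_cases hj' : j < W
    · have h0 : cs[j] = '0' := pvTW_get cs j hjlen hj'
      simp only [h0, if_pos rfl]
      have hc1 : ((j : Int) + 1) = ((j + 1 : Nat) : Int) := by push_cast; ring
      rw [hc1, ih (j + 1) (pref + 1) (by omega) (by omega)]
      push_cast; omega
    · have hjW : j = W := by omega
      subst hjW
      have hne := pvTW_bound cs W hWdef hjlen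
      simp only [if_neg hne]
      omega

theorem pvSuffLoop_spec (cs : List Char) (n : Int) (h0 : 0 ≤ n) (hn : n ≤ (cs.length : Int))
    (hlt : ((cs.take n.toNat).reverse.takeWhile (· == '0')).length < (cs.take n.toNat).length) :
    ∀ (fuel : Nat) (j : Nat) (suff : Int),
      j ≤ ((cs.take n.toNat).reverse.takeWhile (· == '0')).length →
      ((cs.take n.toNat).reverse.takeWhile (· == '0')).length - j < fuel →
      pvSuffLoop cs fuel (n - 1 - (j : Int)) suff
        = suff + ((((cs.take n.toNat).reverse.takeWhile (· == '0')).length - j : Nat) : Int) := by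
  set l := cs.take n.toNat with hldef
  set T := (l.reverse.takeWhile (· == '0')).length with hTdef
  have hllen : l.length = n.toNat := by
    rw [hldef]; exact List.length_take_of_le (by omega)
  have hrlen : l.reverse.length = n.toNat := by simpa using hllen
  intro fuel
  induction fuel with
  | zero => intro j suff hj hf; omega
  | succ f ih =>
    intro j suff hj hf
    have hTl : T < l.length := hlt
    have hjr : j < l.reverse.length := by omega
    have hidx0 : 0 ≤ n - 1 - (j : Int) := by omega
    have hidxNat : (n - 1 - (j : Int)).toNat = n.toNat - 1 - j := by omega
    have hjl : j < l.length := by omega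
    have hcsq : cs[(n - 1 - (j : Int)).toNat]? = some (l.reverse[j]'hjr) := by
      rw [hidxNat]
      have h1 : l.reverse[j]? = l[l.length - 1 - j]? := List.getElem?_reverse hjl
      rw [hllen] at h1
      have h2 : l[n.toNat - 1 - j]? = cs[n.toNat - 1 - j]? := by
        rw [hldef, List.getElem?_take, if_pos (by omega)]
      have h3 : l.reverse[j]? = some (l.reverse[j]'hjr) := List.getElem?_eq_getElem hjr
      rw [← h2, ← h1, h3]
    rw [pvSuffLoop]
    rw [PySem.List.pyGet?_of_nonneg cs hidx0, hcsq]
    by_cases hj' : j < T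
    · have hz : l.reverse[j]'hjr = '0' := pvTW_get l.reverse j hjr hj'
      simp only [hz, if_pos rfl]
      have hc1 : n - 1 - (j : Int) - 1 = n - 1 - ((j + 1 : Nat) : Int) := by push_cast; ring
      rw [hc1, ih (j + 1) (suff + 1) (by omega) (by omega)]
      push_cast; omega
    · have hjT : j = T := by omega
      subst hjT
      have hne := pvTW_bound l.reverse T hTdef (by omega)
      simp only [if_neg hne]
      omega

theorem pvAllZero (l : List Char) : (∀ c ∈ l, c = '0') → pvR l = [l] := by
  induction l with
  | nil => intro _; rfl
  | cons c t ih =>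
    intro h
    have hc : c = '0' := h c List.mem_cons_self
    simp only [pvR, if_pos hc, ih (fun x hx => h x (List.mem_cons_of_mem c hx))]
    simp

theorem pvNotAll (l : List Char) (h0 : 0 ≤ (l.length : Int))
    (hne : pvPyMax (pvLens l) ≠ (l.length : Int)) :
    (l.takeWhile (· == '0')).length < l.length ∧
    (l.reverse.takeWhile (· == '0')).length < l.length := by
  have hall : ¬ (∀ c ∈ l, c = '0') := by
    intro hall
    apply hne
    rw [pvLens, pvAllZero l hall]
    simp [pvPyMax]
  constructor
  · rcases Nat.lt_or_ge (l.takeWhile (· == '0')).length l.length with h | h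
    · exact h
    · exfalso
      apply hall
      have heq : l.takeWhile (· == '0') = l :=
        (List.takeWhile_prefix _).eq_of_length (le_antisymm (List.takeWhile_prefix _).length_le h)
      intro c hc
      have := List.mem_takeWhile_imp (l := l) (p := (· == '0')) (heq ▸ hc)
      simpa using this
  · rcases Nat.lt_or_ge (l.reverse.takeWhile (· == '0')).length l.length with h | h
    · exact h
    · exfalso
      apply hall
      have heq : l.reverse.takeWhile (· == '0') = l.reverse :=
        (List.takeWhile_prefix _).eq_of_length
          (le_antisymm (List.takeWhile_prefix _).length_le (by simpa using h))
      intro c hc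
      have hcr : c ∈ l.reverse := by simpa using hc
      have := List.mem_takeWhile_imp (l := l.reverse) (p := (· == '0')) (heq ▸ hcr)
      simpa using this

theorem pvAFor (cs : List Char) (n : Int) (h0 : 0 ≤ n) (hn : n ≤ (cs.length : Int)) :
    (PySem.List.pyRange 0 n 1).foldl
      (fun (p : Int × Int) i =>
        let len' := if PySem.List.pyGetD cs i '?' = '0' then p.2 + 1 else (0 : Int)
        (max p.1 len', len')) (0, 0)
      = (cs.take n.toNat).foldl pvStep (0, 0) := by
  set l := cs.take n.toNat with hldef
  have hllen : l.length = n.toNat := by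
    rw [hldef]; exact List.length_take_of_le (by omega)
  have hcast : ((l.length : Nat) : Int) = n := by omega
  have hcong : (PySem.List.pyRange 0 n 1).foldl
      (fun (p : Int × Int) i =>
        let len' := if PySem.List.pyGetD cs i '?' = '0' then p.2 + 1 else (0 : Int)
        (max p.1 len', len')) (0, 0)
    = (PySem.List.pyRange 0 n 1).foldl
      (fun (p : Int × Int) i => pvStep p (PySem.List.pyGetD l i '?')) (0, 0) := by
    apply PySem.List.foldl_congr_mem
    intro acc x hx
    rw [PySem.List.mem_pyRange_one] at hx
    have hxl : x < (l.length : Int) := by omega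
    have hxc : x < (cs.length : Int) := by omega
    rw [PySem.List.pyGetD_eq_getElem cs '?' hx.1 hxc,
        PySem.List.pyGetD_eq_getElem l '?' hx.1 hxl]
    have hge : l[x.toNat]'(by omega) = cs[x.toNat]'(by omega) := by
      have h1 : l[x.toNat]? = cs[x.toNat]? := by
        rw [hldef, List.getElem?_take, if_pos (by omega)]
      rw [List.getElem?_eq_getElem (by omega : x.toNat < l.length),
          List.getElem?_eq_getElem (by omega : x.toNat < cs.length)] at h1
      exact Option.some.inj h1
    rw [hge]
    rfl
  rw [hcong, ← hcast]
  exact PySem.List.foldl_pyRange_zero_pyGetD' l '?' pvStep (0, 0)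

theorem pvMain (st : String) (n k : Int) (h0 : 0 ≤ n) (hn : n ≤ (st.toList.length : Int)) :
    max_length_substring st n k = max_length_substring_alt st n k := by
  simp only [max_length_substring, max_length_substring_alt]
  rw [pvAFor st.toList n h0 hn, pvFold0]
  rw [PySem.List.slice_to st.toList h0]
  rw [pvSplitOn, pvR1_map]
  set cs := st.toList with hcs
  set l := cs.take n.toNat with hldef
  have hllen : l.length = n.toNat := List.length_take_of_le (by omega)
  show (if pvPyMax (pvLens l) = n then n * k else _) = (if pvPyMax ((pvR l).map fun r => (r.length : Int)) = n then n * k else _)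
  have hlens : (pvR l).map (fun r => (r.length : Int)) = pvLens l := rfl
  rw [hlens]
  by_cases hmax : pvPyMax (pvLens l) = n
  · rw [if_pos hmax, if_pos hmax]
  · rw [if_neg hmax, if_neg hmax]
    obtain ⟨hWl, hTl⟩ := pvNotAll l (by positivity) (by
      intro hcon; apply hmax; rw [hcon]; omega)
    have hTW : cs.takeWhile (· == '0') = l.takeWhile (· == '0') :=
      pvTW_take cs n.toNat (by rw [← hldef]; omega)
    have hWcs : (cs.takeWhile (· == '0')).length < cs.length := by
      rw [hTW]
      have : l.length ≤ cs.length := by omega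
      omega
    -- pref
    have hpref := pvPrefLoop_spec cs hWcs (2 * cs.length + 2) 0 0 (by omega)
      (by have := (List.takeWhile_prefix (l := cs) (· == '0')).length_le; omega)
    simp only [Nat.cast_zero, Nat.sub_zero, zero_add] at hpref
    rw [hpref, hTW]
    -- suff
    have hsuff := pvSuffLoop_spec cs n h0 hn (by rw [← hldef]; exact hTl)
      (2 * cs.length + 2) 0 0 (by omega)
      (by have h1 := (List.takeWhile_prefix (l := (cs.take n.toNat).reverse) (· == '0')).length_le
          simp only [List.length_reverse] at h1
          have h2 : (cs.take n.toNat).length ≤ cs.length := by simp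
          omega)
    simp only [Nat.cast_zero, Nat.sub_zero, zero_add, sub_zero] at hsuff
    rw [hsuff]
    -- B's head and last
    have hhead : ((PySem.List.pyGetD (pvR l) 0 []).length : Int)
        = ((l.takeWhile (· == '0')).length : Int) := by
      rw [PySem.List.pyGetD_zero]
      rw [← pvHeadD]
      cases h : pvR l with
      | nil => exact absurd h (pvR_ne_nil l)
      | cons a t => simp
    have hlast : ((PySem.List.pyGetD (pvR l) (-1) []).length : Int)
        = ((l.reverse.takeWhile (· == '0')).length : Int) := by
      rw [PySem.List.pyGetD_neg_one (pvR l) [] (pvR_ne_nil l)]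
      rw [← pvLast]
      rw [List.getLast?_eq_some_getLast (pvR_ne_nil l)]
      simp
    rw [hhead, hlast, ← hldef]

-- ===== VERDICT (by name: the statement is the Claim_ definition above) =====
theorem max_length_substring_spec : Claim_equal_max_length_substring := by
  intro st n k _hdom hpre
  unfold Spec_max_length_substring
  exact pvMain st n k hpre.1 hpre.2
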